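-- pv_equiv track=rewrite | github.com/blesk011/coding-test-study | naver/codility/Stack and Queues/StoneWall.py | solution
-- ===== SOURCE A (Python) =====
-- def solution(H):
--     stack = []
--     cnt = 0
--
--     for h in H:
--         if len(stack) == 0:
--             stack.append(h)
--         else:
--             last = stack[-1]
--             if last != h:
--                 stack.append(h)
--                 cnt += 1
--
--     if cnt == 0:
--         cnt = 1
--
--     return cnt
-- ===== SOURCE B (Python) =====
-- def solution(H):
--     # Divide and conquer: transitions in H[lo:hi] = transitions in each half
--     # plus the one boundary pair (mid-1, mid); base case: fewer than 2 elements.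
--     def trans(lo, hi):
--         if hi - lo < 2:
--             return 0
--         mid = (lo + hi) // 2
--         return trans(lo, mid) + trans(mid, hi) + (1 if H[mid - 1] != H[mid] else 0)
--     t = trans(0, len(H))
--     return t if t > 0 else 1
-- ===== Notes on version B (the rewrite author's own statement) =====
-- stated objective: alternative
-- what changed: Replaces A's left-to-right stack/accumulator scan by a divide-and-conquer recursion on index ranges: the transition count of H[lo:hi] is the sum of the counts of the two halves plus the single boundary pair at the midpoint, with a final 'or 1' guard; no stack and no sequential pass.
import Mathlib
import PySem

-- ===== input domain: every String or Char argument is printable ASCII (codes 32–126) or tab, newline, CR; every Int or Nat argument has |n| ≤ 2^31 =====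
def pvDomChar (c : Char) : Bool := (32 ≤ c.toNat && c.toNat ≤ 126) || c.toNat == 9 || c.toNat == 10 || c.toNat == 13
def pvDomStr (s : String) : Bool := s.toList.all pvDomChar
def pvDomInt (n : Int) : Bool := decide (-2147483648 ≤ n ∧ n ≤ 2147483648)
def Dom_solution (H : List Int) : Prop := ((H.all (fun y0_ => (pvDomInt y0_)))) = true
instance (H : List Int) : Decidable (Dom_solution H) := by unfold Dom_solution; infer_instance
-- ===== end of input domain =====

-- B replaces A's stack/accumulator scan by a divide-and-conquer recursion on index ranges (halves + boundary pair), then the same 'or 1' guard (alternative decomposition, same cost).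


-- ===== PORT A =====
-- one iteration of A's for-loop over state (stack, cnt); stack[-1] is PySem.List.pyGet? stack (-1)
def solLoopA (acc : List Int × Int) (h : Int) : List Int × Int :=
  let (stack, cnt) := acc
  if stack.length = 0 then (stack ++ [h], cnt)
  else
    let last := (PySem.List.pyGet? stack (-1)).getD 0  -- stack nonempty here, so getD never fires
    if last ≠ h then (stack ++ [h], cnt + 1) else (stack, cnt)

def solution (H : List Int) : Int :=
  let r := H.foldl solLoopA ([], 0)
  let cnt := r.2
  if cnt = 0 then 1 else cnt

-- ===== PORT B =====
-- Source B's nested 'trans(lo, hi)': transitions in H[lo:hi] = left half + right half + boundary pair.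
-- fuel only makes the halving recursion structurally total (len(H) ≥ any interval width); H[mid-1], H[mid]
-- are in range whenever reached from solution_alt, so the getD default never fires
def transB (H : List Int) (fuel : Nat) (lo hi : Int) : Int :=
  match fuel with
  | 0 => 0  -- never reached: fuel starts at len(H) ≥ interval width, which halves each call
  | fuel + 1 =>
    if hi - lo < 2 then 0
    else
      let mid := PySem.Int.floordiv (lo + hi) 2
      transB H fuel lo mid + transB H fuel mid hi +
        (if (PySem.List.pyGet? H (mid - 1)).getD 0 ≠ (PySem.List.pyGet? H mid).getD 0 then 1 else 0)

def solution_alt (H : List Int) : Int :=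
  let t := transB H H.length 0 (H.length : Int)
  if t > 0 then t else 1

-- ===== PRECONDITION & SPEC =====
def Spec_solution (H : List Int) (out : Int) : Prop := out = solution_alt H
instance (H : List Int) (out : Int) : Decidable (Spec_solution H out) := by unfold Spec_solution; infer_instance

-- ===== CLAIM (what is proved, stated in full; the proofs are below) =====
def Claim_equal_solution : Prop := ∀ (H : List Int), Dom_solution H → Spec_solution H (solution H)

-- ===== LEMMAS AND PROOFS =====
-- adjacent-distinct transition count, the common specification of both programs
def adj : List Int → Int
  | [] => 0
  | [_] => 0
  | a :: b :: t => (if a = b then 0 else 1) + adj (b :: t)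

theorem adj_nonneg (H : List Int) : 0 ≤ adj H := by
  match H with
  | [] => simp [adj]
  | [_] => simp [adj]
  | a :: b :: t =>
    have := adj_nonneg (b :: t)
    simp only [adj]; split <;> omega

-- the pair indicator at start index j (as transB's boundary term sees it)
def pairAtN (H : List Int) (j : Nat) : Int :=
  if (PySem.List.pyGet? H (j : Int)).getD 0 ≠ (PySem.List.pyGet? H ((j : Int) + 1)).getD 0 then 1 else 0

theorem pairAtN_cons (x : Int) (t : List Int) (j : Nat) :
    pairAtN (x :: t) (j + 1) = pairAtN t j := by
  simp only [pairAtN]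
  have h1 : ((j + 1 : Nat) : Int) = (j : Int) + 1 := by push_cast; ring
  rw [h1, PySem.List.pyGet?_cons_succ]
  have h2 : (j : Int) + 1 + 1 = ((j + 1 : Nat) : Int) + 1 := by push_cast; ring
  rw [h2, PySem.List.pyGet?_cons_succ, h1]

theorem pairAtN_zero (a b : Int) (t : List Int) :
    pairAtN (a :: b :: t) 0 = if a = b then 0 else 1 := by
  simp only [pairAtN, Nat.cast_zero]
  rw [show (0 : Int) + 1 = ((0 : Nat) : Int) + 1 by norm_num, PySem.List.pyGet?_cons_succ]
  simp [PySem.List.pyGet?_zero_cons]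

-- A-side loop invariant: with nonempty stack ending in p, folding adds adj (p :: H) to cnt
theorem foldl_solLoopA (H : List Int) : ∀ (s : List Int) (p c : Int),
    (H.foldl solLoopA (s ++ [p], c)).2 = c + adj (p :: H) := by
  induction H with
  | nil => intro s p c; simp [adj]
  | cons h t ih =>
    intro s p c
    by_cases hph : p = h
    · have : solLoopA (s ++ [p], c) h = (s ++ [p], c) := by
        simp [solLoopA, PySem.List.pyGet?_neg_one_append_singleton, hph]
      rw [List.foldl_cons, this, ih s p c]
      simp [adj, hph]
    · have : solLoopA (s ++ [p], c) h = ((s ++ [p]) ++ [h], c + 1) := by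
        simp [solLoopA, PySem.List.pyGet?_neg_one_append_singleton, hph]
      rw [List.foldl_cons, this, ih (s ++ [p]) h (c + 1)]
      simp [adj, hph]
      omega

-- B-side: transB on a natural index range is the sum of pair indicators over [a, b-1)
theorem transB_eq_sum (H : List Int) : ∀ (fuel a b : Nat), b - a ≤ fuel →
    transB H fuel (a : Int) (b : Int) = ∑ j ∈ Finset.Ico a (b - 1), pairAtN H j := by
  intro fuel
  induction fuel with
  | zero =>
    intro a b hf
    rw [transB, Finset.Ico_eq_empty (by omega), Finset.sum_empty]
  | succ fuel ih =>
    intro a b hf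
    by_cases hsmall : (b : Int) - (a : Int) < 2
    · rw [transB, if_pos hsmall, Finset.Ico_eq_empty (by omega), Finset.sum_empty]
    · have hab : a + 2 ≤ b := by omega
      have hmid : PySem.Int.floordiv ((a : Int) + (b : Int)) 2 = (((a + b) / 2 : Nat) : Int) := by
        rw [show ((a : Int) + (b : Int)) = ((a + b : Nat) : Int) by push_cast; ring]
        exact_mod_cast PySem.Int.floordiv_natCast (a + b) 2
      set m : Nat := (a + b) / 2 with hm
      have ham : a < m := by omega
      have hmb : m < b := by omega
      have hstep : transB H (fuel + 1) (a : Int) (b : Int) = transB H fuel (a : Int) ((m : Nat) : Int)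
          + transB H fuel ((m : Nat) : Int) ((b : Nat) : Int)
          + (if (PySem.List.pyGet? H (((m : Nat) : Int) - 1)).getD 0 ≠
              (PySem.List.pyGet? H ((m : Nat) : Int)).getD 0 then (1:Int) else 0) := by
        rw [transB, if_neg hsmall, hmid]
      rw [hstep, ih a m (by omega), ih m b (by omega)]
      have hb1 : (((m : Nat) : Int) - 1) = (((m - 1 : Nat)) : Int) := by omega
      have hb2 : (((m - 1 : Nat)) : Int) + 1 = ((m : Nat) : Int) := by omega
      have hbd : (if (PySem.List.pyGet? H ((m : Nat) - 1 : Int)).getD 0 ≠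
          (PySem.List.pyGet? H ((m : Nat) : Int)).getD 0 then (1:Int) else 0) = pairAtN H (m - 1) := by
        simp only [pairAtN, hb2]
        rw [hb1]
      rw [hbd]
      have hsplit : ∑ j ∈ Finset.Ico a (m - 1), pairAtN H j + ∑ j ∈ Finset.Ico (m - 1) (b - 1), pairAtN H j
          = ∑ j ∈ Finset.Ico a (b - 1), pairAtN H j :=
        Finset.sum_Ico_consecutive _ (by omega) (by omega)
      have hbot : ∑ j ∈ Finset.Ico (m - 1) (b - 1), pairAtN H j
          = pairAtN H (m - 1) + ∑ j ∈ Finset.Ico (m - 1 + 1) (b - 1), pairAtN H j :=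
        Finset.sum_eq_sum_Ico_succ_bot (by omega) _
      rw [show m - 1 + 1 = m by omega] at hbot
      omega

-- the indicator sum over the whole list is adj
theorem sum_pairAtN_eq_adj (H : List Int) :
    ∑ j ∈ Finset.Ico 0 (H.length - 1), pairAtN H j = adj H := by
  match H with
  | [] => simp [adj]
  | [_] => simp [adj]
  | a :: b :: t =>
    have hlen : (a :: b :: t).length - 1 = t.length + 1 := by simp
    rw [hlen, Finset.sum_eq_sum_Ico_succ_bot (by omega) _]
    have hshift : ∑ j ∈ Finset.Ico (0 + 1) (t.length + 1), pairAtN (a :: b :: t) j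
        = ∑ j ∈ Finset.Ico 0 (b :: t).length.pred, pairAtN (b :: t) j := by
      rw [Finset.sum_Ico_eq_sum_range, Finset.sum_Ico_eq_sum_range]
      simp only [Nat.add_sub_cancel, List.length_cons, Nat.pred_succ, Nat.sub_zero, Nat.zero_add]
      refine Finset.sum_congr rfl (fun i _ => ?_)
      rw [show 1 + i = i + 1 by ring, pairAtN_cons]
    rw [hshift]
    have : (b :: t).length.pred = (b :: t).length - 1 := rfl
    rw [this, sum_pairAtN_eq_adj (b :: t), pairAtN_zero, adj]

-- ===== VERDICT (by name: the statement is the Claim_ definition above) =====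
theorem solution_spec : Claim_equal_solution := by
  intro H _
  unfold Spec_solution solution solution_alt
  have htrans : transB H H.length 0 (H.length : Int) = adj H := by
    rw [show (0 : Int) = ((0 : Nat) : Int) by norm_num,
        transB_eq_sum H H.length 0 H.length (by omega), sum_pairAtN_eq_adj]
  cases H with
  | nil =>
    simp only [htrans]
    simp [adj]
  | cons h t =>
    have step : solLoopA ([], 0) h = ([] ++ [h], 0) := by simp [solLoopA]
    have hfold := foldl_solLoopA t [] h 0
    have hp := adj_nonneg (h :: t)
    simp only [List.foldl_cons, step, hfold, htrans]
    split <;> split <;> omega
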